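-- pv_equiv track=rewrite | github.com/willykta/script.program.sub-ai-translator | core/batch_retry_optimizer.py | split_batch_progressive
-- ===== SOURCE A (Python) =====
-- from typing import List, Dict, Any, Optional, Tuple, Callable
--
-- def split_batch_progressive(batch: List, target_size: int) -> List[List]:
--     """Split batch using progressive size reduction"""
--     if len(batch) <= target_size:
--         return [batch]
--
--     splits = []
--     remaining = batch.copy()
--
--     while remaining:
--         current_split = remaining[:target_size]
--         splits.append(current_split)
--         remaining = remaining[target_size:]
--
--         # Gradually reduce target size if we're creating too many small batches
--         if len(splits) > 3 and target_size > 1: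
--             target_size = max(1, target_size // 2)
--
--     return splits
-- ===== SOURCE B (Python) =====
-- def split_batch_progressive(batch, target_size):
--     """Split batch using progressive size reduction (two-pass: size schedule, then slicing)."""
--     if len(batch) <= target_size:
--         return [batch]
--     n = len(batch)
--     sizes = []
--     total = 0
--     size = target_size
--     while total < n:
--         sizes.append(size)
--         total += size
--         if len(sizes) > 3 and size > 1:
--             size = max(1, size // 2)
--     chunks = []
--     i = 0
--     for s in sizes:
--         chunks.append(batch[i:i+s])
--         i += s
--     return chunks
-- ===== Notes on version B (the rewrite author's own statement) =====
-- stated objective: alternative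
-- what changed: Replaces A's single while loop that mutates target_size while consuming the list with two separate passes: first build the full chunk-size schedule (applying the same shrink rule), then slice the batch with an index pointer, one chunk per scheduled size.
import Mathlib
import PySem

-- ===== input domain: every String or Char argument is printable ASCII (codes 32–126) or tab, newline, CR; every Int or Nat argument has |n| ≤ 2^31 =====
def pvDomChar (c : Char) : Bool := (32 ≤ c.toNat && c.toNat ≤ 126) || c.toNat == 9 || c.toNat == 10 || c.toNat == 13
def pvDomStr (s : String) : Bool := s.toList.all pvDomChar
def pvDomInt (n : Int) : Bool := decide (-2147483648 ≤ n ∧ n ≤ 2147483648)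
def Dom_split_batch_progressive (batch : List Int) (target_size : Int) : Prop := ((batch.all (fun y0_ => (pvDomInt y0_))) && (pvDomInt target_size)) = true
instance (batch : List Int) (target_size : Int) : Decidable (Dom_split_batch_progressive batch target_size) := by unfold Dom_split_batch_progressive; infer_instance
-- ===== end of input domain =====

-- B replaces A's single mutate-while-consuming loop by two passes — first build the size
-- schedule, then slice the batch by an index pointer — same values (objective: alternative).

-- ===== PORT A =====
-- A's while loop; fuel = batch.length suffices since each iteration consumes ≥ 1 element
-- whenever target_size ≥ 1 (the only case Pre_ admits with a nonempty remaining list).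
def pvALoop : Nat → List Int → Int → List (List Int) → List (List Int)
  | 0, _, _, splits => splits
  | fuel + 1, remaining, ts, splits =>
    if remaining = [] then splits
    else
      let current_split := PySem.List.slice remaining none (some ts)
      let splits' := splits ++ [current_split]
      let remaining' := PySem.List.slice remaining (some ts) none
      let ts' := if splits'.length > 3 ∧ ts > 1 then max 1 (PySem.Int.floordiv ts 2) else ts
      pvALoop fuel remaining' ts' splits'

def split_batch_progressive (batch : List Int) (target_size : Int) : List (List Int) :=
  if (batch.length : Int) ≤ target_size then [batch]
  else pvALoop batch.length batch target_size []

-- ===== PORT B =====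
-- first pass of Source B: build the list of chunk sizes (fuel = batch.length, one unit per appended size)
def pvBSched : Nat → Int → Int → Int → List Int → List Int
  | 0, _, _, _, sizes => sizes
  | fuel + 1, n, total, size, sizes =>
    if total < n then
      let sizes' := sizes ++ [size]
      let total' := total + size
      let size' := if sizes'.length > 3 ∧ size > 1 then max 1 (PySem.Int.floordiv size 2) else size
      pvBSched fuel n total' size' sizes'
    else sizes

-- second pass of Source B: walk an index pointer over batch, one slice per scheduled size
def pvBCut (batch : List Int) : List Int → Int → List (List Int) → List (List Int)
  | [], _, chunks => chunks
  | s :: rest, i, chunks =>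
    pvBCut batch rest (i + s) (chunks ++ [PySem.List.slice batch (some i) (some (i + s))])

def split_batch_progressive_alt (batch : List Int) (target_size : Int) : List (List Int) :=
  if (batch.length : Int) ≤ target_size then [batch]
  else
    pvBCut batch (pvBSched batch.length (batch.length : Int) 0 target_size []) 0 []

-- ===== PRECONDITION & SPEC =====
-- Pre_ excludes target_size ≤ 0 with a nonempty batch longer than target_size: there A's
-- while loop never shrinks `remaining` and A loops forever (never returns a value).
def Pre_split_batch_progressive (batch : List Int) (target_size : Int) : Prop :=
  1 ≤ target_size ∨ (batch.length : Int) ≤ target_size ∨ batch = []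
instance (batch : List Int) (target_size : Int) : Decidable (Pre_split_batch_progressive batch target_size) := by unfold Pre_split_batch_progressive; infer_instance

def pvWitness_split_batch_progressive : List Int × Int := ([5, 4, 3, 2, 1, 0, -1, 2, 9], 2)

def Spec_split_batch_progressive (batch : List Int) (target_size : Int) (out : List (List Int)) : Prop := out = split_batch_progressive_alt batch target_size
instance (batch : List Int) (target_size : Int) (out : List (List Int)) : Decidable (Spec_split_batch_progressive batch target_size out) := by unfold Spec_split_batch_progressive; infer_instance

-- ===== CLAIM (what is proved, stated in full; the proofs are below) =====
def Claim_equal_split_batch_progressive : Prop := ∀ (batch : List Int) (target_size : Int), Dom_split_batch_progressive batch target_size → Pre_split_batch_progressive batch target_size → Spec_split_batch_progressive batch target_size (split_batch_progressive batch target_size)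

-- ===== LEMMAS AND PROOFS =====

-- proof-side pure version of the schedule pass: no accumulator, count k carried explicitly
def pvSchedP : Nat → Int → Int → Int → Nat → List Int
  | 0, _, _, _, _ => []
  | fuel + 1, n, total, size, k =>
    if total < n then
      size :: pvSchedP fuel n (total + size)
        (if k + 1 > 3 ∧ size > 1 then max 1 (PySem.Int.floordiv size 2) else size) (k + 1)
    else []

-- proof-side pure version of the cutting pass
def pvCutP (batch : List Int) : Int → List Int → List (List Int)
  | _, [] => []
  | i, s :: rest => PySem.List.slice batch (some i) (some (i + s)) :: pvCutP batch (i + s) rest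

theorem pvBSched_eq (fuel : Nat) : ∀ (n total size : Int) (sizes : List Int),
    pvBSched fuel n total size sizes = sizes ++ pvSchedP fuel n total size sizes.length := by
  induction fuel with
  | zero => intro n total size sizes; simp [pvBSched, pvSchedP]
  | succ fuel ih =>
    intro n total size sizes
    simp only [pvBSched, pvSchedP]
    split
    · rw [ih]; simp
    · simp

theorem pvBCut_eq (batch : List Int) : ∀ (sizes : List Int) (i : Int) (chunks : List (List Int)),
    pvBCut batch sizes i chunks = chunks ++ pvCutP batch i sizes := by
  intro sizes
  induction sizes with
  | nil => intro i chunks; simp [pvBCut, pvCutP]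
  | cons s rest ih => intro i chunks; simp [pvBCut, pvCutP, ih]

theorem pvMain (batch : List Int) (fuel : Nat) : ∀ (i : Nat) (ts : Int), 1 ≤ ts →
    ∀ (acc : List (List Int)),
    pvALoop fuel (batch.drop i) ts acc
      = acc ++ pvCutP batch (i : Int) (pvSchedP fuel (batch.length : Int) (i : Int) ts acc.length) := by
  induction fuel with
  | zero => intro i ts _ acc; simp [pvALoop, pvSchedP, pvCutP]
  | succ fuel ih =>
    intro i ts hts acc
    by_cases hemp : batch.drop i = []
    · have hlen : batch.length ≤ i := by
        simpa [List.drop_eq_nil_iff] using hemp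
      have hcond : ¬ ((i : Int) < (batch.length : Int)) := by omega
      simp [pvALoop, hemp, pvSchedP, hcond, pvCutP]
    · have hlen : i < batch.length := by
        by_contra h
        exact hemp (List.drop_eq_nil_iff.mpr (by omega))
      have hcond : (i : Int) < (batch.length : Int) := by omega
      obtain ⟨t, rfl⟩ : ∃ t : Nat, ts = (t : Int) := ⟨ts.toNat, by omega⟩
      have hcur : PySem.List.slice (batch.drop i) none (some (t : Int))
          = (batch.drop i).take t := PySem.List.slice_to_natCast _ _
      have hrem : PySem.List.slice (batch.drop i) (some (t : Int)) none
          = batch.drop (i + t) := by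
        rw [PySem.List.slice_from_natCast, List.drop_drop, Nat.add_comm]
      have hslc : PySem.List.slice batch (some (i : Int)) (some ((i : Int) + (t : Int)))
          = (batch.drop i).take t := PySem.List.slice_natCast_add _ _ _
      simp only [pvALoop, hemp, if_false, hcur, hrem, pvSchedP, hcond, if_true, pvCutP, hslc]
      have hts' : (1 : Int) ≤ (if acc.length + 1 > 3 ∧ (t : Int) > 1
          then max 1 (PySem.Int.floordiv (t : Int) 2) else (t : Int)) := by
        split
        · exact le_max_left _ _
        · exact hts
      simp only [List.length_append, List.length_cons, List.length_nil]
      rw [ih (i + t) _ hts' (acc ++ [(batch.drop i).take t])]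
      simp only [List.length_append, List.length_cons, List.length_nil]
      have : ((i + t : Nat) : Int) = (i : Int) + (t : Int) := by push_cast; ring
      rw [this]
      simp [List.append_assoc]

-- ===== VERDICT (by name: the statement is the Claim_ definition above) =====
theorem split_batch_progressive_spec : Claim_equal_split_batch_progressive := by
  intro batch ts _ hpre
  unfold Spec_split_batch_progressive split_batch_progressive split_batch_progressive_alt
  split
  · rfl
  · rename_i hgt
    rcases hpre with hts | hle | hnil
    · rw [pvBCut_eq, pvBSched_eq]
      have := pvMain batch batch.length 0 ts hts []
      simpa using this
    · exact absurd hle hgt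
    · subst hnil
      simp [pvALoop, pvBSched, pvBCut]
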